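-- pv_equiv track=rewrite | github.com/lucas-richards/leethub | binaryTree.py | solution
-- ===== SOURCE A (Python) =====
-- def count_left(loop, arr, i, left):
--     for num in range(loop):
--         if i >= len(arr): return left,i
--         left += arr[i]
--         i += 1
--     return left,i
--
-- def count_right(loop, arr, i, right):
--     for num in range(loop):
--         if i >= len(arr): return right,i
--         right += arr[i]
--         i += 1
--     return right,i
--
-- def solution(arr):
--     # Type your solution here
--     left = 0
--     loop = 1
--     right = 0
--     i = 1
--
--     if len(arr) == 0: return ""
--     while i < len(arr):
--         left, i = count_left(loop, arr, i, left)
--         right, i = count_right(loop, arr, i, right)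
--         loop = loop * 2
--
--     if right > left: return "Right"
--     if left > right: return "Left"
--     if left == right: return ""
--
--
--     pass
-- ===== SOURCE B (Python) =====
-- def solution(arr):
--     if len(arr) == 0:
--         return ""
--     left = 0
--     right = 0
--     side_left = True
--     block = 1
--     cnt = 0
--     for x in arr[1:]:
--         if side_left:
--             left += x
--         else:
--             right += x
--         cnt += 1
--         if cnt == block:
--             cnt = 0
--             if not side_left:
--                 block *= 2
--             side_left = not side_left
--     if right > left:
--         return "Right"
--     if left > right:
--         return "Left"
--     return ""
-- ===== Notes on version B (the rewrite author's own statement) =====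
-- stated objective: simpler
-- what changed: Replaced A's two accumulator-passing helper functions and nested while/for index loops by one flat pass over arr[1:] maintaining a side flag, block size and in-block counter (doubling the block after each right block).
import Mathlib
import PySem

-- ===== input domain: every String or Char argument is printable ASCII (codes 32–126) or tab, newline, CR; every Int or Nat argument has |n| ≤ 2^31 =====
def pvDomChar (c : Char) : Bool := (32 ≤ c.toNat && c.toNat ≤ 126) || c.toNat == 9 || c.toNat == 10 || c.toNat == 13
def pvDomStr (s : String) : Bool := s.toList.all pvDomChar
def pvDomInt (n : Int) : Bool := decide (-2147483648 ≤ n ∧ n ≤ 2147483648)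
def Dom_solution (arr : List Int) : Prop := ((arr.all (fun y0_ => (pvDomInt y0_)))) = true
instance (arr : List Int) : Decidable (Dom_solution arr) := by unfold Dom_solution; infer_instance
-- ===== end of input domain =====

-- B replaces A's two accumulator-passing helpers and nested while/for loops by one flat
-- pass keeping a side flag, block size and in-block counter (objective: simpler).

-- ===== PORT A =====
-- count_left's for-loop over range(loop), with its early return when i >= len(arr).
-- arr[i] is only read under the guard 0 <= i < len(arr), where (pyGet? …).getD 0 is exact.
def countLeftGo (n : Nat) (arr : List Int) (i left : Int) : Int × Int :=
  match n with
  | 0 => (left, i)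
  | m + 1 =>
    if i ≥ (arr.length : Int) then (left, i)
    else countLeftGo m arr (i + 1) (left + (PySem.List.pyGet? arr i).getD 0)

def count_left (loop : Int) (arr : List Int) (i left : Int) : Int × Int :=
  countLeftGo loop.toNat arr i left

def countRightGo (n : Nat) (arr : List Int) (i right : Int) : Int × Int :=
  match n with
  | 0 => (right, i)
  | m + 1 =>
    if i ≥ (arr.length : Int) then (right, i)
    else countRightGo m arr (i + 1) (right + (PySem.List.pyGet? arr i).getD 0)

def count_right (loop : Int) (arr : List Int) (i right : Int) : Int × Int :=
  countRightGo loop.toNat arr i right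

-- the while loop; fuel arr.length suffices because i strictly increases each iteration
def solutionWhile (fuel : Nat) (arr : List Int) (i left right loop : Int) : Int × Int :=
  match fuel with
  | 0 => (left, right)
  | n + 1 =>
    if i < (arr.length : Int) then
      let p := count_left loop arr i left
      let q := count_right loop arr p.2 right
      solutionWhile n arr q.2 p.1 q.1 (loop * 2)
    else (left, right)

def solution (arr : List Int) : String :=
  if (arr.length : Int) = 0 then ""
  else
    let p := solutionWhile arr.length arr 1 0 0 1
    if p.2 > p.1 then "Right"
    else if p.1 > p.2 then "Left"
    else ""  -- A's 'if left == right: return ""' ; the trailing 'pass' is unreachable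

-- ===== PORT B =====
-- one fold step: add x to the current side, bump the counter; at a block boundary reset
-- the counter, flip the side, and double the block only after a right block
def stepB (st : Int × Int × Bool × Int × Int) (x : Int) : Int × Int × Bool × Int × Int :=
  match st with
  | (l, r, side, b, c) =>
    let l' := if side then l + x else l
    let r' := if side then r else r + x
    let c' := c + 1
    if c' = b then (l', r', !side, if side then b else b * 2, 0)
    else (l', r', side, b, c')

def solution_alt (arr : List Int) : String :=
  if (arr.length : Int) = 0 then ""
  else
    let st := (PySem.List.slice arr (some 1) none).foldl stepB (0, 0, true, 1, 0)
    if st.2.1 > st.1 then "Right"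
    else if st.1 > st.2.1 then "Left"
    else ""

-- ===== PRECONDITION & SPEC =====
def Spec_solution (arr : List Int) (out : String) : Prop := out = solution_alt arr
instance (arr : List Int) (out : String) : Decidable (Spec_solution arr out) := by unfold Spec_solution; infer_instance

-- ===== CLAIM (what is proved, stated in full; the proofs are below) =====
def Claim_equal_solution : Prop := ∀ (arr : List Int), Dom_solution arr → Spec_solution arr (solution arr)

-- ===== LEMMAS AND PROOFS =====

lemma countLeftGo_eq (n : Nat) (arr : List Int) (i left : Int)
    (h0 : 0 ≤ i) (h1 : i ≤ (arr.length : Int)) :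
    countLeftGo n arr i left =
      (left + ((arr.drop i.toNat).take n).sum, min (i + n) (arr.length : Int)) := by
  induction n generalizing i left with
  | zero =>
    simp [countLeftGo]
    omega
  | succ m ih =>
    rw [countLeftGo]
    by_cases h : i ≥ (arr.length : Int)
    · have hi : i = (arr.length : Int) := le_antisymm h1 h
      have hd : arr.drop i.toNat = [] := by
        apply List.drop_eq_nil_of_le; omega
      simp [h, hd]
      omega
    · simp only [h, if_false]
      push Not at h
      rw [ih (i+1) _ (by omega) (by omega)]
      have hlt : i.toNat < arr.length := by omega
      have hd : arr.drop i.toNat = arr[i.toNat] :: arr.drop (i.toNat + 1) :=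
        List.drop_eq_getElem_cons hlt
      have hget : (PySem.List.pyGet? arr i).getD 0 = arr[i.toNat] := by
        simp only [PySem.List.pyGet?, PySem.List.pyIdx?, if_pos h0, if_pos h]
        simp [List.getElem?_eq_getElem hlt]
      have h1n : (i + 1).toNat = i.toNat + 1 := by omega
      simp only [Prod.mk.injEq]
      refine ⟨?_, by omega⟩
      rw [hget, h1n, hd, List.take_succ_cons, List.sum_cons]
      ring

lemma countRightGo_eq (n : Nat) (arr : List Int) (i right : Int)
    (h0 : 0 ≤ i) (h1 : i ≤ (arr.length : Int)) :
    countRightGo n arr i right =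
      (right + ((arr.drop i.toNat).take n).sum, min (i + n) (arr.length : Int)) := by
  induction n generalizing i right with
  | zero =>
    simp [countRightGo]
    omega
  | succ m ih =>
    rw [countRightGo]
    by_cases h : i ≥ (arr.length : Int)
    · have hi : i = (arr.length : Int) := le_antisymm h1 h
      have hd : arr.drop i.toNat = [] := by
        apply List.drop_eq_nil_of_le; omega
      simp [h, hd]
      omega
    · simp only [h, if_false]
      push Not at h
      rw [ih (i+1) _ (by omega) (by omega)]
      have hlt : i.toNat < arr.length := by omega
      have hd : arr.drop i.toNat = arr[i.toNat] :: arr.drop (i.toNat + 1) :=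
        List.drop_eq_getElem_cons hlt
      have hget : (PySem.List.pyGet? arr i).getD 0 = arr[i.toNat] := by
        simp only [PySem.List.pyGet?, PySem.List.pyIdx?, if_pos h0, if_pos h]
        simp [List.getElem?_eq_getElem hlt]
      have h1n : (i + 1).toNat = i.toNat + 1 := by omega
      simp only [Prod.mk.injEq]
      refine ⟨?_, by omega⟩
      rw [hget, h1n, hd, List.take_succ_cons, List.sum_cons]
      ring

lemma foldB_run (xs : List Int) (l r : Int) (side : Bool) (b c : Int)
    (h0 : 0 ≤ c) (h1 : c < b) :
    xs.foldl stepB (l, r, side, b, c) =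
      if (xs.length : Int) < b - c then
        ((if side then l + xs.sum else l), (if side then r else r + xs.sum), side, b, c + xs.length)
      else
        (xs.drop (b - c).toNat).foldl stepB
          ((if side then l + (xs.take (b - c).toNat).sum else l),
           (if side then r else r + (xs.take (b - c).toNat).sum),
           !side, (if side then b else b * 2), 0) := by
  induction xs generalizing l r c with
  | nil =>
    have h2 : ((([] : List Int).length : Int)) < b - c := by simp; omega
    rw [List.foldl_nil, if_pos h2]
    cases side <;> simp
  | cons x xs ih =>
    rw [List.foldl_cons]
    by_cases hc : c + 1 = b
    · -- block boundary after this element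
      have hbc : (b - c).toNat = 1 := by omega
      have hnot : ¬ ((((x :: xs).length : Int)) < b - c) := by
        simp [List.length_cons]; omega
      rw [if_neg hnot]
      simp only [stepB, hc]
      rw [hbc]
      simp [List.take_succ_cons, List.drop_succ_cons]
    · have hstep : stepB (l, r, side, b, c) x =
          ((if side then l + x else l), (if side then r else r + x), side, b, c + 1) := by
        simp [stepB, hc]
      rw [hstep, ih _ _ _ (by omega) (by omega)]
      have hbc1 : (b - (c + 1)).toNat + 1 = (b - c).toNat := by omega
      by_cases hlen : ((xs.length : Int)) < b - (c + 1)
      · have hl : (((x :: xs).length : Int)) < b - c := by simp; omega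
        rw [if_pos hlen, if_pos hl]
        cases side <;> simp <;> exact ⟨by ring, by ring⟩
      · have hl : ¬ (((x :: xs).length : Int)) < b - c := by simp; omega
        rw [if_neg hlen, if_neg hl]
        have hdrop : xs.drop (b - (c+1)).toNat = (x :: xs).drop (b - c).toNat := by
          rw [← hbc1]; simp [List.drop_succ_cons]
        have htake : (x :: xs).take (b - c).toNat = x :: xs.take (b - (c+1)).toNat := by
          rw [← hbc1]; simp [List.take_succ_cons]
        rw [hdrop, htake]
        cases side <;> simp <;> rw [add_assoc]

lemma foldB_run_true (xs : List Int) (l r b : Int) (hb : 0 < b) :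
    xs.foldl stepB (l, r, true, b, 0) =
      if (xs.length : Int) < b then (l + xs.sum, r, true, b, (xs.length : Int))
      else (xs.drop b.toNat).foldl stepB (l + (xs.take b.toNat).sum, r, false, b, 0) := by
  rw [foldB_run xs l r true b 0 le_rfl hb]
  simp

lemma foldB_run_false (xs : List Int) (l r b : Int) (hb : 0 < b) :
    xs.foldl stepB (l, r, false, b, 0) =
      if (xs.length : Int) < b then (l, r + xs.sum, false, b, (xs.length : Int))
      else (xs.drop b.toNat).foldl stepB (l, r + (xs.take b.toNat).sum, true, b * 2, 0) := by
  rw [foldB_run xs l r false b 0 le_rfl hb]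
  simp

lemma whileA_eq (fuel : Nat) (arr : List Int) (i l r b : Int)
    (h0 : 0 ≤ i) (hb : 1 ≤ b) (hf : (arr.length : Int) - i ≤ fuel) :
    solutionWhile fuel arr i l r b =
      (((arr.drop i.toNat).foldl stepB (l, r, true, b, 0)).1,
       ((arr.drop i.toNat).foldl stepB (l, r, true, b, 0)).2.1) := by
  induction fuel generalizing i l r b with
  | zero =>
    have hd : arr.drop i.toNat = [] := List.drop_eq_nil_of_le (by omega)
    simp [solutionWhile, hd]
  | succ n ih =>
    by_cases h : i < (arr.length : Int)
    case neg =>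
      have hd : arr.drop i.toNat = [] := List.drop_eq_nil_of_le (by omega)
      simp [solutionWhile, h, hd]
    case pos =>
    simp only [solutionWhile, if_pos h]
    have hbn : ((b.toNat : Nat) : Int) = b := Int.toNat_of_nonneg (by omega)
    have hdl : (((arr.drop i.toNat).length : Nat) : Int) = (arr.length : Int) - i := by
      simp [List.length_drop]; omega
    rw [count_left, countLeftGo_eq b.toNat arr i l h0 (le_of_lt h)]
    rw [hbn]
    set L : Int := (arr.length : Int) with hL
    set i1 : Int := min (i + b) L with hi1
    set S1 : Int := ((arr.drop i.toNat).take b.toNat).sum with hS1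
    have hi1a : 0 ≤ i1 := by omega
    have hi1b : i1 ≤ L := by omega
    rw [count_right, countRightGo_eq b.toNat arr i1 r hi1a hi1b, hbn]
    set i2 : Int := min (i1 + b) L with hi2
    set S2 : Int := ((arr.drop i1.toNat).take b.toNat).sum with hS2
    simp only []
    rw [ih i2 (l + S1) (r + S2) (b * 2) (by omega) (by omega) (by omega)]
    rw [foldB_run_true (arr.drop i.toNat) l r b (by omega)]
    by_cases c1 : (((arr.drop i.toNat).length : Nat) : Int) < b
    · rw [if_pos c1]
      have hLi : L - i < b := by omega
      have hi1L : i1 = L := by omega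
      have hi2L : i2 = L := by omega
      have hdL : arr.drop i2.toNat = [] := List.drop_eq_nil_of_le (by omega)
      have hS1' : S1 = (arr.drop i.toNat).sum := by
        rw [hS1]; congr 1; apply List.take_of_length_le; omega
      have hS2' : S2 = 0 := by
        rw [hS2, hi1L]
        have : arr.drop L.toNat = [] := List.drop_eq_nil_of_le (by omega)
        simp [this]
      rw [hdL]
      simp [hS1', hS2']
    · rw [if_neg c1]
      have hbL : i + b ≤ L := by omega
      have hi1v : i1 = i + b := by omega
      have hdd : (arr.drop i.toNat).drop b.toNat = arr.drop i1.toNat := by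
        rw [List.drop_drop]; congr 1; omega
      rw [hdd]
      rw [foldB_run_false (arr.drop i1.toNat) (l + S1) r b (by omega)]
      have hdl1 : (((arr.drop i1.toNat).length : Nat) : Int) = L - i1 := by
        simp [List.length_drop]; omega
      by_cases c2 : (((arr.drop i1.toNat).length : Nat) : Int) < b
      · rw [if_pos c2]
        have hi2L : i2 = L := by omega
        have hdL : arr.drop i2.toNat = [] := List.drop_eq_nil_of_le (by omega)
        have hS2' : S2 = (arr.drop i1.toNat).sum := by
          rw [hS2]; congr 1; apply List.take_of_length_le; omega
        rw [hdL]
        simp [hS2']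
      · rw [if_neg c2]
        have hi2v : i2 = i1 + b := by omega
        have hdd2 : (arr.drop i1.toNat).drop b.toNat = arr.drop i2.toNat := by
          rw [List.drop_drop]; congr 1; omega
        rw [hdd2]

-- ===== VERDICT (by name: the statement is the Claim_ definition above) =====
theorem solution_spec : Claim_equal_solution := by
  intro arr _
  show solution arr = solution_alt arr
  by_cases h : (arr.length : Int) = 0
  · simp [solution, solution_alt, h]
  · simp only [solution, solution_alt, if_neg h]
    have hs : PySem.List.slice arr (some 1) none = arr.drop 1 := by
      rw [PySem.List.slice_from_one, ← List.drop_one]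
    have key := whileA_eq arr.length arr 1 0 0 1 (by omega) le_rfl (by omega)
    simp only [Int.toNat_one] at key
    rw [key, hs]
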